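-- pv_equiv track=rewrite | github.com/lambeau/random-hacking | assorted.py | largestItemAssociation
-- ===== SOURCE A (Python) =====
-- def largestItemAssociation(pairs):
--     groups = []
--     for pair in pairs:
--         found = False
--         for group in groups:
--             if pair[0] in group or pair[1] in group:
--                 group.update(pair)
--                 found = True
--                 break
--         if not found:
--             groups.append(set(pair))
--     return sorted(list(max(groups, key=len)))
-- ===== SOURCE B (Python) =====
-- def largestItemAssociation(pairs):
--     # value -> smallest index of a group containing it; removes A's inner scan over all groups
--     groups = []
--     first = {}
--     for pair in pairs:
--         idxs = [first[v] for v in (pair[0], pair[1]) if v in first]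
--         if idxs:
--             i = min(idxs)
--             groups[i].update(pair)
--         else:
--             i = len(groups)
--             groups.append(set(pair))
--         for v in pair:
--             if v not in first or first[v] > i:
--                 first[v] = i
--     return sorted(max(groups, key=len))
-- ===== Notes on version B (the rewrite author's own statement) =====
-- stated objective: alternative
-- what changed: B replaces A's inner scan over all groups with a hash map from value to the smallest index of a group containing it, so each pair picks its group by two dict lookups instead of scanning the groups list.
-- outside the precondition, e.g. on largestItemAssociation([[]]): A returns [], B raises IndexError; on largestItemAssociation([['a', 'b'], ['a']]): A returns ['a', 'b'], B raises IndexError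
import Mathlib
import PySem

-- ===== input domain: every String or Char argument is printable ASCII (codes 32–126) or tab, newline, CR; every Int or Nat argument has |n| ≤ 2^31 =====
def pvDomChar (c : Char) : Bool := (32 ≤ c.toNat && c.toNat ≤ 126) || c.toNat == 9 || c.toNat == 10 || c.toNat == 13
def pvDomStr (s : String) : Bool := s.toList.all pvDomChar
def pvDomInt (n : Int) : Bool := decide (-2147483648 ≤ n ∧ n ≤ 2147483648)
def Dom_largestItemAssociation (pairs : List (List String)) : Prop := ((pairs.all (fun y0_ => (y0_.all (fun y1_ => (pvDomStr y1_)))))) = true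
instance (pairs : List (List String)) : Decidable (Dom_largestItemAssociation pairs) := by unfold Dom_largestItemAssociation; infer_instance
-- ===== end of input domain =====

-- B replaces A's inner scan over all groups with a value → smallest-group-index map; proved to return A's exact value.

-- ===== PORT A =====
-- inner `for group in groups` loop of A: the FIRST group containing pair[0] or pair[1]
-- is updated in place; if none matches, set(pair) is appended at the end.
def aScan (p0 p1 : String) (pair : List String) : List (PySem.Set String) → List (PySem.Set String)
  | [] => [PySem.Set.ofList pair]
  | g :: gs =>
    if PySem.Set.contains g p0 || PySem.Set.contains g p1 then
      PySem.Set.update g pair :: gs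
    else
      g :: aScan p0 p1 pair gs

-- pair[0] / pair[1]: Pre_ guarantees 2 ≤ pair.length, so getD is exactly Python's indexing here
def largestItemAssociation (pairs : List (List String)) : List String :=
  let groups := pairs.foldl (fun groups pair => aScan (pair.getD 0 "") (pair.getD 1 "") pair groups) []
  match PySem.List.max? groups (fun g => PySem.Set.len g) with
  | some g => PySem.List.sorted g (fun x => x) false
  | none => []   -- max([]) raises ValueError in Python; excluded by Pre_

-- ===== PORT B =====
-- `for v in pair: if v not in first or first[v] > i: first[v] = i`
def bFirstUpd (i : Nat) (pair : List String) (first : PySem.Dict String Nat) : PySem.Dict String Nat :=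
  pair.foldl (fun f v =>
    match f.get? v with
    | none => f.insert v i
    | some j => if i < j then f.insert v i else f) first

-- one iteration of B's main loop over `pairs`; state = (groups, first)
def bStep (st : List (PySem.Set String) × PySem.Dict String Nat) (pair : List String) :
    List (PySem.Set String) × PySem.Dict String Nat :=
  let idxs := [pair.getD 0 "", pair.getD 1 ""].filterMap (fun v => st.2.get? v)
  match PySem.List.min? idxs (fun j => j) with
  | some i => (st.1.set i (PySem.Set.update (st.1.getD i PySem.Set.empty) pair), bFirstUpd i pair st.2)
  | none => (st.1 ++ [PySem.Set.ofList pair], bFirstUpd st.1.length pair st.2)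

def largestItemAssociation_alt (pairs : List (List String)) : List String :=
  let st := pairs.foldl bStep ([], PySem.Dict.empty)
  match PySem.List.max? st.1 (fun g => PySem.Set.len g) with
  | some g => PySem.List.sorted g (fun x => x) false
  | none => []   -- max([]) raises ValueError in Python; excluded by Pre_

-- ===== PRECONDITION & SPEC =====
-- Pre_ excludes the empty list (A raises ValueError from max) and lists containing a pair with
-- fewer than two elements: A usually raises IndexError there, but sometimes returns because its
-- lazy `pair[0] in group or pair[1] in group` test happens not to index the short pair (an
-- artefact of evaluation order); B raises IndexError on every short pair.
def Pre_largestItemAssociation (pairs : List (List String)) : Prop :=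
  pairs ≠ [] ∧ ∀ p ∈ pairs, 2 ≤ p.length
instance (pairs : List (List String)) : Decidable (Pre_largestItemAssociation pairs) := by
  unfold Pre_largestItemAssociation; infer_instance

def pvWitness_largestItemAssociation : List (List String) :=
  [["a", "b"], ["b", "c"], ["d", "e"]]

def Spec_largestItemAssociation (pairs : List (List String)) (out : List String) : Prop :=
  out = largestItemAssociation_alt pairs
instance (pairs : List (List String)) (out : List String) : Decidable (Spec_largestItemAssociation pairs out) := by
  unfold Spec_largestItemAssociation; infer_instance

-- ===== CLAIM (what is proved, stated in full; the proofs are below) =====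
def Claim_equal_largestItemAssociation : Prop := ∀ (pairs : List (List String)), Dom_largestItemAssociation pairs → Pre_largestItemAssociation pairs → Spec_largestItemAssociation pairs (largestItemAssociation pairs)

-- ===== LEMMAS AND PROOFS =====

-- minimum of two optional indices (none = "no group matches")
def omin : Option Nat → Option Nat → Option Nat
  | none, none => none
  | none, some y => some y
  | some x, none => some x
  | some x, some y => some (min x y)

-- index of the first group satisfying P
def fidxP (P : PySem.Set String → Bool) : List (PySem.Set String) → Option Nat
  | [] => none
  | g :: gs => if P g then some 0 else (fidxP P gs).map (· + 1)

-- the invariant tying B's dict to A's groups list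
def GInv (groups : List (PySem.Set String)) (first : PySem.Dict String Nat) : Prop :=
  ∀ v, first.get? v = fidxP (fun g => PySem.Set.contains g v) groups

theorem contains_add (s : PySem.Set String) (x v : String) :
    PySem.Set.contains (PySem.Set.add s x) v = (PySem.Set.contains s v || (v == x)) := by
  simp only [PySem.Set.add, PySem.Set.contains]
  split <;> by_cases hv : v = x <;> simp_all [beq_iff_eq]

theorem contains_update (pair : List String) (s : PySem.Set String) (v : String) :
    PySem.Set.contains (PySem.Set.update s pair) v = (PySem.Set.contains s v || pair.contains v) := by
  induction pair generalizing s with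
  | nil => simp [PySem.Set.update, PySem.Set.contains]
  | cons w rest ih =>
    have h1 : PySem.Set.update s (w :: rest) = PySem.Set.update (PySem.Set.add s w) rest := rfl
    rw [h1, ih, contains_add]
    by_cases hv : v = w <;> simp [hv, beq_iff_eq, Bool.or_comm, Bool.or_assoc, Bool.or_left_comm]

theorem contains_ofList (pair : List String) (v : String) :
    PySem.Set.contains (PySem.Set.ofList pair) v = pair.contains v := by
  have h1 : PySem.Set.ofList pair = PySem.Set.update PySem.Set.empty pair := rfl
  rw [h1, contains_update]
  simp [PySem.Set.empty, PySem.Set.contains]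

theorem aScan_eq (p0 p1 : String) (pair : List String) (groups : List (PySem.Set String)) :
    aScan p0 p1 pair groups =
      match fidxP (fun g => PySem.Set.contains g p0 || PySem.Set.contains g p1) groups with
      | some i => groups.set i (PySem.Set.update (groups.getD i PySem.Set.empty) pair)
      | none => groups ++ [PySem.Set.ofList pair] := by
  induction groups with
  | nil => rfl
  | cons g gs ih =>
    show (if PySem.Set.contains g p0 || PySem.Set.contains g p1 then
            PySem.Set.update g pair :: gs else g :: aScan p0 p1 pair gs) = _
    cases h : (PySem.Set.contains g p0 || PySem.Set.contains g p1) with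
    | true => simp only [if_pos rfl, fidxP, h, if_pos]; rfl
    | false =>
      have hns : ¬ ((PySem.Set.contains g p0 || PySem.Set.contains g p1) = true) := by
        rw [h]; exact Bool.false_ne_true
      rw [if_neg Bool.false_ne_true, ih]
      show _ = (match (if (PySem.Set.contains g p0 || PySem.Set.contains g p1) then some 0
                       else (fidxP (fun g => PySem.Set.contains g p0 || PySem.Set.contains g p1) gs).map (· + 1)) with
                | some i => (g :: gs).set i (PySem.Set.update ((g :: gs).getD i PySem.Set.empty) pair)
                | none => (g :: gs) ++ [PySem.Set.ofList pair])
      rw [if_neg hns]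
      cases hf : fidxP (fun g => PySem.Set.contains g p0 || PySem.Set.contains g p1) gs <;>
        simp [hf, List.set_cons_succ, List.getD_cons_succ]

theorem fidxP_or (P Q : PySem.Set String → Bool) (groups : List (PySem.Set String)) :
    fidxP (fun g => P g || Q g) groups = omin (fidxP P groups) (fidxP Q groups) := by
  induction groups with
  | nil => rfl
  | cons g gs ih =>
    simp only [fidxP, ih]
    by_cases hp : P g = true <;> by_cases hq : Q g = true <;>
      simp only [hp, hq, Bool.true_or, Bool.or_true, Bool.false_or, Bool.or_false,
        if_true, if_false, Bool.or_self] <;>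
      cases h1 : fidxP P gs <;> cases h2 : fidxP Q gs <;>
        simp [omin, hp, hq, Nat.succ_min_succ]

theorem fidxP_lt_length (P : PySem.Set String → Bool) (groups : List (PySem.Set String)) (j : Nat)
    (h : fidxP P groups = some j) : j < groups.length := by
  induction groups generalizing j with
  | nil => simp [fidxP] at h
  | cons g gs ih =>
    by_cases hp : P g = true
    · simp [fidxP, hp] at h; simp only [List.length_cons]; omega
    · simp only [fidxP, if_neg hp, Option.map_eq_some_iff] at h
      obtain ⟨k, hk, rfl⟩ := h
      have := ih k hk
      simp only [List.length_cons]; omega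

theorem omin_omin_right (x : Option Nat) (i : Nat) :
    omin (omin x (some i)) (some i) = omin x (some i) := by
  cases x <;> simp [omin, Nat.min_assoc]

theorem bFirstUpd_get? (i : Nat) (pair : List String) (first : PySem.Dict String Nat) (v : String) :
    (bFirstUpd i pair first).get? v =
      if v ∈ pair then omin (first.get? v) (some i) else first.get? v := by
  induction pair generalizing first with
  | nil => simp [bFirstUpd]
  | cons w rest ih =>
    have hstep : bFirstUpd i (w :: rest) first =
        bFirstUpd i rest (match first.get? w with
          | none => first.insert w i
          | some j => if i < j then first.insert w i else first) := rfl
    rw [hstep, ih]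
    by_cases hv : v = w
    · subst hv
      cases hw : first.get? v with
      | none => by_cases hm : v ∈ rest <;>
          simp [hm, hw, PySem.Dict.get?_insert_self, omin, omin_omin_right]
      | some j =>
        by_cases hij : i < j <;> by_cases hm : v ∈ rest <;>
          simp [hij, hm, hw, PySem.Dict.get?_insert_self, omin, omin_omin_right, Nat.min_def]
    · have hg : ∀ x : Nat, (first.insert w x).get? v = first.get? v :=
        fun x => PySem.Dict.get?_insert_of_ne first x hv
      cases hw : first.get? w with
      | none => simp [hg, hv]
      | some j => by_cases hij : i < j <;> simp [hij, hg, hv]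

theorem fidxP_set_update_mem (v : String) (pair : List String) (groups : List (PySem.Set String))
    (i : Nat) (hv : pair.contains v = true) (hi : i < groups.length) :
    fidxP (fun g => PySem.Set.contains g v)
        (groups.set i (PySem.Set.update (groups.getD i PySem.Set.empty) pair)) =
      omin (fidxP (fun g => PySem.Set.contains g v) groups) (some i) := by
  induction groups generalizing i with
  | nil => simp at hi
  | cons g gs ih =>
    cases i with
    | zero =>
      simp only [List.set, List.getD_cons_zero, fidxP, contains_update, hv, Bool.or_true, if_true]
      by_cases hc : PySem.Set.contains g v = true
      · simp only [if_pos hc]; simp [omin]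
      · simp only [if_neg hc]
        cases hf : fidxP (fun g => PySem.Set.contains g v) gs <;> simp [omin]
    | succ k =>
      have hk : k < gs.length := by simpa using hi
      rw [List.set_cons_succ, List.getD_cons_succ]
      simp only [fidxP, ih k hk]
      by_cases hc : PySem.Set.contains g v = true
      · simp only [if_pos hc]; simp [omin]
      · simp only [if_neg hc]
        cases hf : fidxP (fun g => PySem.Set.contains g v) gs <;>
          simp [omin, Nat.succ_min_succ]

theorem fidxP_set_update_not_mem (v : String) (pair : List String) (groups : List (PySem.Set String))
    (i : Nat) (hv : pair.contains v = false) :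
    fidxP (fun g => PySem.Set.contains g v)
        (groups.set i (PySem.Set.update (groups.getD i PySem.Set.empty) pair)) =
      fidxP (fun g => PySem.Set.contains g v) groups := by
  induction groups generalizing i with
  | nil => simp
  | cons g gs ih =>
    cases i with
    | zero =>
      simp only [List.set, List.getD_cons_zero, fidxP, contains_update, hv, Bool.or_false]
    | succ k =>
      rw [List.set_cons_succ, List.getD_cons_succ]
      simp only [fidxP, ih k]

theorem fidxP_append_single (P : PySem.Set String → Bool) (groups : List (PySem.Set String))
    (s : PySem.Set String) :
    fidxP P (groups ++ [s]) =
      match fidxP P groups with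
      | some j => some j
      | none => if P s then some groups.length else none := by
  induction groups with
  | nil => by_cases h : P s = true <;> simp [fidxP, h]
  | cons g gs ih =>
    simp only [List.cons_append, fidxP, ih]
    by_cases h : P g = true
    · simp [h]
    · simp only [if_neg h]
      cases hf : fidxP P gs with
      | some j => simp
      | none => by_cases hs : P s = true <;> simp [hs, List.length_cons]

-- the "some group matched" case of one B-step
theorem step_found (groups : List (PySem.Set String)) (first : PySem.Dict String Nat)
    (pair : List String) (i : Nat) (h : GInv groups first)
    (hfid : fidxP (fun g => PySem.Set.contains g (pair.getD 0 "") || PySem.Set.contains g (pair.getD 1 "")) groups = some i)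
    (hstep : bStep (groups, first) pair =
      (groups.set i (PySem.Set.update (groups.getD i PySem.Set.empty) pair), bFirstUpd i pair first)) :
    (bStep (groups, first) pair).1 = aScan (pair.getD 0 "") (pair.getD 1 "") pair groups ∧
      GInv (bStep (groups, first) pair).1 (bStep (groups, first) pair).2 := by
  have hi : i < groups.length := fidxP_lt_length _ _ _ hfid
  constructor
  · rw [hstep, aScan_eq, hfid]
  · intro v
    rw [hstep]
    show (bFirstUpd i pair first).get? v = _
    rw [bFirstUpd_get?]
    by_cases hm : v ∈ pair
    · rw [if_pos hm, h v, fidxP_set_update_mem v pair groups i (by simpa using hm) hi]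
    · rw [if_neg hm, h v, fidxP_set_update_not_mem v pair groups i (by simpa using hm)]

-- the "no group matched" case of one B-step
theorem step_none (groups : List (PySem.Set String)) (first : PySem.Dict String Nat)
    (pair : List String) (h : GInv groups first)
    (hfid : fidxP (fun g => PySem.Set.contains g (pair.getD 0 "") || PySem.Set.contains g (pair.getD 1 "")) groups = none)
    (hstep : bStep (groups, first) pair =
      (groups ++ [PySem.Set.ofList pair], bFirstUpd groups.length pair first)) :
    (bStep (groups, first) pair).1 = aScan (pair.getD 0 "") (pair.getD 1 "") pair groups ∧
      GInv (bStep (groups, first) pair).1 (bStep (groups, first) pair).2 := by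
  constructor
  · rw [hstep, aScan_eq, hfid]
  · intro v
    rw [hstep]
    show (bFirstUpd groups.length pair first).get? v = _
    rw [bFirstUpd_get?, fidxP_append_single, contains_ofList]
    by_cases hm : v ∈ pair
    · rw [if_pos hm, h v]
      cases hfv : fidxP (fun g => PySem.Set.contains g v) groups with
      | none => simp [omin, hm]
      | some j =>
        have hj : j < groups.length := fidxP_lt_length _ _ _ hfv
        simp [omin, Nat.min_eq_left (le_of_lt hj)]
    · rw [if_neg hm, h v]
      cases hfv : fidxP (fun g => PySem.Set.contains g v) groups with
      | none => simp [hm]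
      | some j => simp

-- one step of the simulation: B tracks A's groups and keeps the invariant
theorem step_sim (groups : List (PySem.Set String)) (first : PySem.Dict String Nat)
    (pair : List String) (h : GInv groups first) :
    (bStep (groups, first) pair).1 = aScan (pair.getD 0 "") (pair.getD 1 "") pair groups ∧
      GInv (bStep (groups, first) pair).1 (bStep (groups, first) pair).2 := by
  have hor := fidxP_or (fun g => PySem.Set.contains g (pair.getD 0 ""))
      (fun g => PySem.Set.contains g (pair.getD 1 "")) groups
  cases ho0 : fidxP (fun g => PySem.Set.contains g (pair.getD 0 "")) groups with
  | none =>
    cases ho1 : fidxP (fun g => PySem.Set.contains g (pair.getD 1 "")) groups with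
    | none =>
      refine step_none groups first pair h (by rw [hor, ho0, ho1]; rfl) ?_
      show (match PySem.List.min? ([pair.getD 0 "", pair.getD 1 ""].filterMap
          (fun v => first.get? v)) (fun j => j) with
        | some i => (groups.set i (PySem.Set.update (groups.getD i PySem.Set.empty) pair), bFirstUpd i pair first)
        | none => (groups ++ [PySem.Set.ofList pair], bFirstUpd groups.length pair first)) = _
      rw [show [pair.getD 0 "", pair.getD 1 ""].filterMap (fun v => first.get? v) = ([] : List Nat) by
        simp only [List.filterMap_cons, List.filterMap_nil, h (pair.getD 0 ""), h (pair.getD 1 ""), ho0, ho1]]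
      rfl
    | some j1 =>
      refine step_found groups first pair j1 h (by rw [hor, ho0, ho1]; rfl) ?_
      show (match PySem.List.min? ([pair.getD 0 "", pair.getD 1 ""].filterMap
          (fun v => first.get? v)) (fun j => j) with
        | some i => (groups.set i (PySem.Set.update (groups.getD i PySem.Set.empty) pair), bFirstUpd i pair first)
        | none => (groups ++ [PySem.Set.ofList pair], bFirstUpd groups.length pair first)) = _
      rw [show [pair.getD 0 "", pair.getD 1 ""].filterMap (fun v => first.get? v) = [j1] by
        simp only [List.filterMap_cons, List.filterMap_nil, h (pair.getD 0 ""), h (pair.getD 1 ""), ho0, ho1]]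
      rfl
  | some j0 =>
    cases ho1 : fidxP (fun g => PySem.Set.contains g (pair.getD 1 "")) groups with
    | none =>
      refine step_found groups first pair j0 h (by rw [hor, ho0, ho1]; rfl) ?_
      show (match PySem.List.min? ([pair.getD 0 "", pair.getD 1 ""].filterMap
          (fun v => first.get? v)) (fun j => j) with
        | some i => (groups.set i (PySem.Set.update (groups.getD i PySem.Set.empty) pair), bFirstUpd i pair first)
        | none => (groups ++ [PySem.Set.ofList pair], bFirstUpd groups.length pair first)) = _
      rw [show [pair.getD 0 "", pair.getD 1 ""].filterMap (fun v => first.get? v) = [j0] by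
        simp only [List.filterMap_cons, List.filterMap_nil, h (pair.getD 0 ""), h (pair.getD 1 ""), ho0, ho1]]
      rfl
    | some j1 =>
      refine step_found groups first pair (min j0 j1) h (by rw [hor, ho0, ho1]; rfl) ?_
      show (match PySem.List.min? ([pair.getD 0 "", pair.getD 1 ""].filterMap
          (fun v => first.get? v)) (fun j => j) with
        | some i => (groups.set i (PySem.Set.update (groups.getD i PySem.Set.empty) pair), bFirstUpd i pair first)
        | none => (groups ++ [PySem.Set.ofList pair], bFirstUpd groups.length pair first)) = _
      rw [show [pair.getD 0 "", pair.getD 1 ""].filterMap (fun v => first.get? v) = [j0, j1] by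
        simp only [List.filterMap_cons, List.filterMap_nil, h (pair.getD 0 ""), h (pair.getD 1 ""), ho0, ho1]]
      rw [PySem.List.min?_id_cons]
      rfl

theorem loop_sim (pairs : List (List String)) (groups : List (PySem.Set String))
    (first : PySem.Dict String Nat) (h : GInv groups first) :
    (pairs.foldl bStep (groups, first)).1 =
      pairs.foldl (fun gs p => aScan (p.getD 0 "") (p.getD 1 "") p gs) groups := by
  induction pairs generalizing groups first with
  | nil => rfl
  | cons pair rest ih =>
    obtain ⟨h1, h2⟩ := step_sim groups first pair h
    have hpair : bStep (groups, first) pair =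
        ((bStep (groups, first) pair).1, (bStep (groups, first) pair).2) := rfl
    show (List.foldl bStep (bStep (groups, first) pair) rest).1 = _
    rw [hpair, ih _ _ h2, h1]
    rfl

-- ===== VERDICT (by name: the statement is the Claim_ definition above) =====
theorem largestItemAssociation_spec : Claim_equal_largestItemAssociation := by
  intro pairs _ _
  unfold Spec_largestItemAssociation
  show largestItemAssociation pairs = largestItemAssociation_alt pairs
  simp only [largestItemAssociation, largestItemAssociation_alt]
  rw [loop_sim pairs [] PySem.Dict.empty (fun v => by simp [fidxP, PySem.Dict.get?_empty])]
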